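-- pv_equiv track=rewrite | github.com/YishengSun/Hurricanes-Analysis | Hurricanes Analysis.py | piece_calculation
-- ===== SOURCE A (Python) =====
-- import copy
--
-- def sum_add(a_list):
--     """To calculate the value of each position of a list of integers to
--     the sum of all previous Numbers.Like a=[1,2,3] -> a1=[1,3,6]
--
--     :param a_list: a list contains integers
--     :return: a new list after the calculation
--     """
--     n = 1
--     list1 = copy.deepcopy(a_list)
--     sum_add_list = [list1[0]]
--     while n < len(list1):
--         list1[n] += list1[n - 1]
--         sum_add_list.append(list1[n])
--         n += 1
--     return sum_add_list
--
-- def piece_calculation(data, indices):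
--     """Sum the incoming data according to the indices
--      and store it in a new list. like data=[1,2,3,4,5],
--      indices=[2,3] then return [3,12] which means sum
--      the first 2 elements and last 3 separately.
--
--
--     :param data: a list of numbers
--     :param indices: a list of numbers as indices
--     :return: a list after the piece calculation
--     """
--
--     z = 0
--     sum1 = [sum(data[0:indices[0]])]
--     indices_sum = sum_add(indices)
--     while z < len(indices_sum) - 1:
--         add = sum(data[indices_sum[z]:indices_sum[z + 1]])
--         sum1.append(add)
--         z += 1
--     return sum1
-- ===== SOURCE B (Python) =====
-- def piece_calculation(data, indices):
--     """Single pass with a running offset: no cumulative-index table, no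
--     separate first-slice special case; returns [] on empty indices
--     (where A raises IndexError, excluded by Pre_)."""
--     result = []
--     start = 0
--     for length in indices:
--         result.append(sum(data[start:start + length]))
--         start += length
--     return result
-- ===== Notes on version B (the rewrite author's own statement) =====
-- stated objective: simpler
-- what changed: B fuses A's cumulative-index table (sum_add) plus boundary-pair slicing into one loop that threads a running offset, appending sum(data[start:start+length]) per length.
import Mathlib
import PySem

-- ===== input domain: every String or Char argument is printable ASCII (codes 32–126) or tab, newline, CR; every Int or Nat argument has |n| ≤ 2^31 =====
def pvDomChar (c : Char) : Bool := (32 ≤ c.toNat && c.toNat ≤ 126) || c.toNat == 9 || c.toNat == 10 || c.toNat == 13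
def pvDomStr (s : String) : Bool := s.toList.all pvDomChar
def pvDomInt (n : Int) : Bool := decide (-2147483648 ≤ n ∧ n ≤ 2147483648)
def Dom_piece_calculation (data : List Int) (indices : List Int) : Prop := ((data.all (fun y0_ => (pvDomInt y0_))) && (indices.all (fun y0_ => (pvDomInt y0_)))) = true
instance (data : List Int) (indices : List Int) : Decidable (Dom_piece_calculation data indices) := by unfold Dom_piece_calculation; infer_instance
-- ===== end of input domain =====

-- B replaces A's cumulative-index table (sum_add) + boundary-pair slicing by one
-- running-offset loop ('simpler'); empty indices (A raises IndexError) are excluded by Pre_.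

-- ===== PORT A =====
-- while n < len(list1): list1[n] += list1[n-1]; sum_add_list.append(list1[n]); n += 1
def sumAddLoop (list1 : List Int) (n : Nat) (acc : List Int) : List Int :=
  if n < list1.length then
    let v := PySem.List.pyGetD list1 (n : Int) 0 + PySem.List.pyGetD list1 ((n : Int) - 1) 0
    sumAddLoop (list1.set n v) (n + 1) (acc ++ [v])
  else acc
termination_by list1.length - n
decreasing_by simp only [List.length_set]; omega

def sum_add (a_list : List Int) : List Int :=
  sumAddLoop a_list 1 [PySem.List.pyGetD a_list 0 0]

-- while z < len(indices_sum) - 1: add = sum(data[indices_sum[z]:indices_sum[z+1]]); sum1.append(add); z += 1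
def pieceLoop (data indices_sum : List Int) (z : Nat) (sum1 : List Int) : List Int :=
  if z < indices_sum.length - 1 then
    let add := (PySem.List.slice data (some (PySem.List.pyGetD indices_sum (z : Int) 0))
                                      (some (PySem.List.pyGetD indices_sum ((z : Int) + 1) 0))).sum
    pieceLoop data indices_sum (z + 1) (sum1 ++ [add])
  else sum1
termination_by indices_sum.length - 1 - z

def piece_calculation (data : List Int) (indices : List Int) : List Int :=
  let sum1 := [(PySem.List.slice data (some 0) (some (PySem.List.pyGetD indices 0 0))).sum]
  let indices_sum := sum_add indices
  pieceLoop data indices_sum 0 sum1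

-- ===== PORT B =====
def piece_calculation_alt (data : List Int) (indices : List Int) : List Int :=
  (indices.foldl
    (fun (st : Int × List Int) (length : Int) =>
      (st.1 + length, st.2 ++ [(PySem.List.slice data (some st.1) (some (st.1 + length))).sum]))
    ((0 : Int), ([] : List Int))).2

-- ===== PRECONDITION & SPEC =====
-- Pre_ excludes only empty indices, on which A raises IndexError (it evaluates indices[0]).
def Pre_piece_calculation (data : List Int) (indices : List Int) : Prop := indices ≠ []
instance (data : List Int) (indices : List Int) : Decidable (Pre_piece_calculation data indices) := by
  unfold Pre_piece_calculation; infer_instance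

def pvWitness_piece_calculation : List Int × List Int := ([1, 2, 3, 4, 5], [2, 3])

def Spec_piece_calculation (data : List Int) (indices : List Int) (out : List Int) : Prop := out = piece_calculation_alt data indices
instance (data : List Int) (indices : List Int) (out : List Int) : Decidable (Spec_piece_calculation data indices out) := by unfold Spec_piece_calculation; infer_instance

-- ===== CLAIM (what is proved, stated in full; the proofs are below) =====
def Claim_equal_piece_calculation : Prop := ∀ (data : List Int) (indices : List Int), Dom_piece_calculation data indices → Pre_piece_calculation data indices → Spec_piece_calculation data indices (piece_calculation data indices)

-- ===== LEMMAS AND PROOFS =====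

-- cumulative sums starting after s
def csum (s : Int) : List Int → List Int
  | [] => []
  | x :: xs => (s + x) :: csum (s + x) xs

-- B's per-element slices with running offset s
def bgo (data : List Int) (s : Int) : List Int → List Int
  | [] => []
  | x :: xs => (PySem.List.slice data (some s) (some (s + x))).sum :: bgo data (s + x) xs

-- A's adjacent-pair slices over a boundary list
def adj (data : List Int) : List Int → List Int
  | a :: b :: r => (PySem.List.slice data (some a) (some b)).sum :: adj data (b :: r)
  | _ => []

theorem foldl_eq_bgo (data : List Int) (xs : List Int) (s : Int) (acc : List Int) :
    (xs.foldl
      (fun (st : Int × List Int) (length : Int) =>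
        (st.1 + length, st.2 ++ [(PySem.List.slice data (some st.1) (some (st.1 + length))).sum]))
      (s, acc)).2 = acc ++ bgo data s xs := by
  induction xs generalizing s acc with
  | nil => simp [bgo]
  | cons x xs ih => simp [List.foldl_cons, ih, bgo]

theorem sumAddLoop_eq (suff pref : List Int) (s : Int) (acc : List Int) :
    sumAddLoop (pref ++ s :: suff) (pref.length + 1) acc = acc ++ csum s suff := by
  induction suff generalizing pref s acc with
  | nil =>
    rw [sumAddLoop]
    simp [csum]
  | cons y ys ih =>
    rw [sumAddLoop]
    have hlen : pref.length + 1 < (pref ++ s :: y :: ys).length := by simp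
    rw [if_pos hlen]
    have h1 : PySem.List.pyGetD (pref ++ s :: y :: ys) ((pref.length + 1 : Nat) : Int) 0 = y := by
      rw [PySem.List.pyGetD_natCast]
      simp [List.getD]
    have h2 : PySem.List.pyGetD (pref ++ s :: y :: ys) (((pref.length + 1 : Nat) : Int) - 1) 0 = s := by
      have : (((pref.length + 1 : Nat) : Int) - 1) = ((pref.length : Nat) : Int) := by push_cast; ring
      rw [this, PySem.List.pyGetD_natCast]
      simp [List.getD]
    have hset : (pref ++ s :: y :: ys).set (pref.length + 1) (y + s)
        = (pref ++ [s]) ++ (y + s) :: ys := by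
      rw [List.set_append]
      simp
    have hcast : ((pref.length + 1 : Nat) : Int) = ((pref.length : Nat) : Int) + 1 := by push_cast; ring
    rw [← hcast] at *
    simp only [h1, h2]
    rw [hset]
    have hlen2 : pref.length + 1 + 1 = (pref ++ [s]).length + 1 := by simp
    rw [hlen2, ih (pref ++ [s]) (y + s) (acc ++ [y + s])]
    rw [Int.add_comm y s]
    simp [csum]

theorem pieceLoop_eq (data : List Int) (t isum : List Int) (z : Nat) (acc : List Int)
    (h : isum.drop z = t) :
    pieceLoop data isum z acc = acc ++ adj data t := by
  induction t generalizing z acc with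
  | nil =>
    rw [pieceLoop]
    have hz : isum.length ≤ z := by
      have := congrArg List.length h
      simp [List.length_drop] at this
      omega
    rw [if_neg (by omega)]
    simp [adj]
  | cons a t' ih =>
    cases t' with
    | nil =>
      rw [pieceLoop]
      have hz : isum.length - z = 1 := by
        have := congrArg List.length h
        simpa [List.length_drop] using this
      rw [if_neg (by omega)]
      simp [adj]
    | cons b r =>
      rw [pieceLoop]
      have hz : isum.length - z = r.length + 2 := by
        have := congrArg List.length h
        simpa [List.length_drop] using this
      rw [if_pos (by omega)]
      have ha : isum[z]? = some a := by
        have h0 : (isum.drop z)[0]? = some a := by rw [h]; rfl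
        simpa [List.getElem?_drop] using h0
      have hb : isum[z + 1]? = some b := by
        have h0 : (isum.drop z)[1]? = some b := by rw [h]; rfl
        simpa [List.getElem?_drop] using h0
      have h1 : PySem.List.pyGetD isum ((z : Nat) : Int) 0 = a := by
        rw [PySem.List.pyGetD_natCast]; simp [List.getD, ha]
      have h2 : PySem.List.pyGetD isum (((z : Nat) : Int) + 1) 0 = b := by
        have hc : ((z : Nat) : Int) + 1 = ((z + 1 : Nat) : Int) := by push_cast; ring
        rw [hc, PySem.List.pyGetD_natCast]; simp [List.getD, hb]
      have hdrop : isum.drop (z + 1) = b :: r := by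
        have : isum.drop (z + 1) = (isum.drop z).drop 1 := by
          rw [List.drop_drop]
        rw [this, h]; rfl
      simp only [h1, h2]
      rw [ih (z + 1) _ hdrop]
      simp [adj]

theorem adj_csum (data : List Int) (xs : List Int) (s : Int) :
    adj data (s :: csum s xs) = bgo data s xs := by
  induction xs generalizing s with
  | nil => simp [csum, adj, bgo]
  | cons y ys ih => simp [csum, adj, bgo, ih]

-- ===== VERDICT (by name: the statement is the Claim_ definition above) =====
theorem piece_calculation_spec : Claim_equal_piece_calculation := by
  intro data indices _ hpre
  unfold Spec_piece_calculation
  cases indices with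
  | nil => exact absurd rfl hpre
  | cons x xs =>
    show piece_calculation data (x :: xs) = piece_calculation_alt data (x :: xs)
    have h0 : PySem.List.pyGetD (x :: xs) 0 0 = x := by
      simp [PySem.List.pyGetD_zero_cons]
    have hsa : sum_add (x :: xs) = x :: csum x xs := by
      unfold sum_add
      rw [h0]
      have := sumAddLoop_eq xs ([] : List Int) x [x]
      simpa using this
    unfold piece_calculation piece_calculation_alt
    rw [hsa, h0]
    rw [pieceLoop_eq data (x :: csum x xs) (x :: csum x xs) 0 _ (by simp)]
    rw [foldl_eq_bgo data (x :: xs) 0 []]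
    simp [bgo, adj_csum]
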